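-- pv_equiv track=rewrite | github.com/jasond1016/just-say | python/text_processing.py | drop_word_timing_prefix
-- ===== SOURCE A (Python) =====
-- def merge_text(left: str, right: str) -> str:
--     if not left:
--         return right
--     if not right:
--         return left
--     if left[-1].isspace() or right[0].isspace():
--         return left + right
--     if should_insert_space(left[-1], right[0]):
--         return f"{left} {right}"
--     return left + right
--
-- def is_cjk_char(ch: str) -> bool:
--     return (
--         "\u3040" <= ch <= "\u30ff"
--         or "\u31f0" <= ch <= "\u31ff"
--         or "\u3400" <= ch <= "\u4dbf"
--         or "\u4e00" <= ch <= "\u9fff"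
--         or "\uf900" <= ch <= "\ufaff"
--     )
--
-- def should_insert_space(left_char: str, right_char: str) -> bool:
--     if not left_char or not right_char:
--         return False
--     if left_char.isspace() or right_char.isspace():
--         return False
--     if left_char in {"'", "\u2019", "(", "[", "{"} or right_char in {"'", "\u2019", ".", ",", "!", "?", ";", ":", ")", "]", "}"}:
--         return False
--     if is_cjk_char(left_char) or is_cjk_char(right_char):
--         return False
--
--     left_is_word = is_loose_word_char(left_char)
--     right_is_word = is_loose_word_char(right_char)
--     if left_is_word and right_is_word:
--         return True
--     if left_char in {".", ",", "!", "?", ";", ":"} and right_is_word: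
--         return True
--     return False
--
-- def normalize_loose_text(text: str) -> str:
--     chars = []
--     for ch in text:
--         if ch.isalnum() or "\u3040" <= ch <= "\u30ff" or "\u31f0" <= ch <= "\u31ff" or "\u3400" <= ch <= "\u9fff":
--             chars.append(ch.lower())
--     return "".join(chars)
--
-- def is_loose_word_char(ch: str) -> bool:
--     return ch.isalnum() or "\u3040" <= ch <= "\u30ff" or "\u31f0" <= ch <= "\u31ff" or "\u3400" <= ch <= "\u9fff"
--
-- def drop_word_timing_prefix(
--     word_timings: list[dict] | None, prefix_text: str, max_items: int = 12
-- ) -> list[dict] | None: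
--     if not isinstance(word_timings, list) or not word_timings:
--         return None
--
--     normalized_prefix = normalize_loose_text(prefix_text)
--     if not normalized_prefix:
--         return word_timings
--
--     merged_prefix = ""
--     for index, item in enumerate(word_timings[:max_items]):
--         text = item.get("text")
--         if not isinstance(text, str) or not text.strip():
--             continue
--
--         merged_prefix = merge_text(merged_prefix, text.strip()) if merged_prefix else text.strip()
--         merged_normalized = normalize_loose_text(merged_prefix)
--         if not merged_normalized:
--             continue
--         if merged_normalized == normalized_prefix:
--             remaining = word_timings[index + 1 :]
--             return remaining or None
--         if len(merged_normalized) > len(normalized_prefix):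
--             break
--
--     return word_timings
-- ===== SOURCE B (Python) =====
-- def _normalize_loose(text):
--     return "".join(
--         ch.lower()
--         for ch in text
--         if ch.isalnum()
--         or "\u3040" <= ch <= "\u30ff"
--         or "\u31f0" <= ch <= "\u31ff"
--         or "\u3400" <= ch <= "\u9fff"
--     )
--
--
-- def drop_word_timing_prefix(word_timings, prefix_text, max_items=12):
--     if not isinstance(word_timings, list) or not word_timings:
--         return None
--
--     target = _normalize_loose(prefix_text)
--     if not target:
--         return word_timings
--
--     acc = ""
--     for index, item in enumerate(word_timings[:max_items]):
--         text = item.get("text")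
--         if isinstance(text, str):
--             acc += _normalize_loose(text)
--         if acc == target:
--             remaining = word_timings[index + 1:]
--             return remaining or None
--         if len(acc) > len(target):
--             break
--     return word_timings
-- ===== Notes on version B (the rewrite author's own statement) =====
-- stated objective: simpler
-- what changed: B maintains the running normalized prefix incrementally (appending each item's normalized text), eliminating merge_text/should_insert_space and the re-normalization of the whole merged prefix on every iteration.
import Mathlib
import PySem

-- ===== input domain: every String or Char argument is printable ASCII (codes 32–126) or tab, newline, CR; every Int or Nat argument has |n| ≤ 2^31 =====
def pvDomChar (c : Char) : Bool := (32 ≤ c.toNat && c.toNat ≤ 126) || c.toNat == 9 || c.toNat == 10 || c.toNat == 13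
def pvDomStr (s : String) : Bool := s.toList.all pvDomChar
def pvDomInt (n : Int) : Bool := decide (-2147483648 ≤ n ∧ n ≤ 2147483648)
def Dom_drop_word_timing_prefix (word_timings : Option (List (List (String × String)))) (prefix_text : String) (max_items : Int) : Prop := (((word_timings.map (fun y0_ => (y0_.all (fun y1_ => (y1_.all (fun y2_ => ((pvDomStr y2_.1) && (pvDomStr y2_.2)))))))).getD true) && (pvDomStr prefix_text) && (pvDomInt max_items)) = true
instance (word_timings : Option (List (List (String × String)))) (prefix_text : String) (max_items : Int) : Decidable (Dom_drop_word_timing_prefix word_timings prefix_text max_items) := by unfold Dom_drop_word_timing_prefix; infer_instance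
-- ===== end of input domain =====

-- B drops merge_text/should_insert_space and the re-normalization of the whole merged prefix:
-- it accumulates the normalized text of each item incrementally (objective: simpler).


-- ===== PORT A =====
-- is_loose_word_char / the filter condition of normalize_loose_text (identical in the Python source)
def pvLooseChar (c : Char) : Bool :=
  PySem.Chars.isalnum c
  || (0x3040 ≤ c.toNat && c.toNat ≤ 0x30ff)
  || (0x31f0 ≤ c.toNat && c.toNat ≤ 0x31ff)
  || (0x3400 ≤ c.toNat && c.toNat ≤ 0x9fff)

-- is_cjk_char
def pvIsCjk (c : Char) : Bool :=
  (0x3040 ≤ c.toNat && c.toNat ≤ 0x30ff)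
  || (0x31f0 ≤ c.toNat && c.toNat ≤ 0x31ff)
  || (0x3400 ≤ c.toNat && c.toNat ≤ 0x4dbf)
  || (0x4e00 ≤ c.toNat && c.toNat ≤ 0x9fff)
  || (0xf900 ≤ c.toNat && c.toNat ≤ 0xfaff)

-- should_insert_space (its arguments are always single characters, so the emptiness guard never fires)
def pvShouldInsertSpace (lc rc : Char) : Bool :=
  if PySem.Chars.isspace lc || PySem.Chars.isspace rc then false
  else if (lc == '\'' || lc.toNat == 0x2019 || lc == '(' || lc == '[' || lc == '{')
       || (rc == '\'' || rc.toNat == 0x2019 || rc == '.' || rc == ',' || rc == '!' || rc == '?'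
           || rc == ';' || rc == ':' || rc == ')' || rc == ']' || rc == '}') then false
  else if pvIsCjk lc || pvIsCjk rc then false
  else
    let lw := pvLooseChar lc
    let rw := pvLooseChar rc
    if lw && rw then true
    else if (lc == '.' || lc == ',' || lc == '!' || lc == '?' || lc == ';' || lc == ':') && rw then true
    else false

-- merge_text
def pvMergeText (left right : List Char) : List Char :=
  match left, right with
  | [], r => r
  | l, [] => l
  | a :: as_, r0 :: rs =>
    let lastc := (a :: as_).getLast (List.cons_ne_nil a as_)
    if PySem.Chars.isspace lastc || PySem.Chars.isspace r0 then (a :: as_) ++ (r0 :: rs)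
    else if pvShouldInsertSpace lastc r0 then (a :: as_) ++ ' ' :: (r0 :: rs)
    else (a :: as_) ++ (r0 :: rs)

-- normalize_loose_text: the chars-append loop
def pvNormalizeLoose (cs : List Char) : List Char :=
  cs.foldl (fun acc ch => if pvLooseChar ch then acc ++ [PySem.Chars.lowerChar ch] else acc) []

-- the for-loop of A; 'some r' = an early 'return r', 'none' = fell through (or broke out)
def pvDropLoopA (l : List (List (String × String))) (np : List Char) :
    List (Int × List (String × String)) → List Char → Option (Option (List (List (String × String))))
  | [], _ => none
  | (index, item) :: rest, merged =>
    match PySem.Dict.get? ⟨item⟩ "text" with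
    | none => pvDropLoopA l np rest merged
    | some text =>
      let stripped := PySem.Chars.strip text.toList
      if stripped.isEmpty then pvDropLoopA l np rest merged
      else
        let merged' := if merged.isEmpty then stripped else pvMergeText merged stripped
        let mn := pvNormalizeLoose merged'
        if mn.isEmpty then pvDropLoopA l np rest merged'
        else if mn == np then
          let remaining := PySem.List.slice l (some (index + 1)) none
          some (if remaining.isEmpty then none else some remaining)
        else if np.length < mn.length then none
        else pvDropLoopA l np rest merged'

def drop_word_timing_prefix (word_timings : Option (List (List (String × String)))) (prefix_text : String) (max_items : Int) : Option (List (List (String × String))) :=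
  match word_timings with
  | none => none
  | some l =>
    if l.isEmpty then none
    else
      let np := pvNormalizeLoose prefix_text.toList
      if np.isEmpty then some l
      else
        match pvDropLoopA l np (PySem.List.enumerate (PySem.List.slice l none (some max_items))) [] with
        | some r => r
        | none => some l

-- ===== PORT B =====
-- _normalize_loose: the join-of-comprehension form
def pvNormB (cs : List Char) : List Char :=
  (cs.filter pvLooseChar).map PySem.Chars.lowerChar

-- B's loop: the running normalized prefix 'acc', no merged raw text
def pvDropLoopB (l : List (List (String × String))) (np : List Char) :
    List (Int × List (String × String)) → List Char → Option (Option (List (List (String × String))))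
  | [], _ => none
  | (index, item) :: rest, acc =>
    let acc' := match PySem.Dict.get? ⟨item⟩ "text" with
      | some text => acc ++ pvNormB text.toList
      | none => acc
    if acc' == np then
      let remaining := PySem.List.slice l (some (index + 1)) none
      some (if remaining.isEmpty then none else some remaining)
    else if np.length < acc'.length then none
    else pvDropLoopB l np rest acc'

def drop_word_timing_prefix_alt (word_timings : Option (List (List (String × String)))) (prefix_text : String) (max_items : Int) : Option (List (List (String × String))) :=
  match word_timings with
  | none => none
  | some l =>
    if l.isEmpty then none
    else
      let target := pvNormB prefix_text.toList
      if target.isEmpty then some l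
      else
        match pvDropLoopB l target (PySem.List.enumerate (PySem.List.slice l none (some max_items))) [] with
        | some r => r
        | none => some l

-- ===== PRECONDITION & SPEC =====
def Spec_drop_word_timing_prefix (word_timings : Option (List (List (String × String)))) (prefix_text : String) (max_items : Int) (out : Option (List (List (String × String)))) : Prop := out = drop_word_timing_prefix_alt word_timings prefix_text max_items
instance (word_timings : Option (List (List (String × String)))) (prefix_text : String) (max_items : Int) (out : Option (List (List (String × String)))) : Decidable (Spec_drop_word_timing_prefix word_timings prefix_text max_items out) := by unfold Spec_drop_word_timing_prefix; infer_instance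

-- ===== CLAIM (what is proved, stated in full; the proofs are below) =====
def Claim_equal_drop_word_timing_prefix : Prop := ∀ (word_timings : Option (List (List (String × String)))) (prefix_text : String) (max_items : Int), Dom_drop_word_timing_prefix word_timings prefix_text max_items → Spec_drop_word_timing_prefix word_timings prefix_text max_items (drop_word_timing_prefix word_timings prefix_text max_items)

-- ===== LEMMAS AND PROOFS =====

-- a whitespace character is never kept by normalize_loose_text
lemma pvLooseChar_of_isspace (c : Char) (h : PySem.Chars.isspace c = true) : pvLooseChar c = false := by
  simp only [PySem.Chars.isspace, Bool.or_eq_true, Bool.and_eq_true, decide_eq_true_eq,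
             Char.toNat] at h
  simp only [pvLooseChar, PySem.Chars.isalnum, PySem.Chars.isalpha, PySem.Chars.isdigit,
        PySem.Chars.isupper, PySem.Chars.islower, Char.le_def, Bool.or_eq_false_iff,
        Bool.and_eq_false_iff, decide_eq_false_iff_not, not_le, Char.toNat,
        UInt32.le_iff_toNat_le, show ('A'.val.toNat) = 65 from rfl, show ('Z'.val.toNat) = 90 from rfl,
        show ('a'.val.toNat) = 97 from rfl, show ('z'.val.toNat) = 122 from rfl,
        show ('0'.val.toNat) = 48 from rfl, show ('9'.val.toNat) = 57 from rfl]
  omega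

-- the A-side append loop computes the B-side filter+map
lemma pvNormalizeLoose_eq (cs : List Char) : pvNormalizeLoose cs = pvNormB cs := by
  simpa [pvNormalizeLoose, pvNormB] using
    PySem.List.foldl_append_if pvLooseChar PySem.Chars.lowerChar cs []

lemma pvFilter_dropWhile (cs : List Char) :
    (cs.dropWhile PySem.Chars.isspace).filter pvLooseChar = cs.filter pvLooseChar := by
  conv_rhs => rw [← List.takeWhile_append_dropWhile (p := PySem.Chars.isspace) (l := cs)]
  rw [List.filter_append]
  have : (cs.takeWhile PySem.Chars.isspace).filter pvLooseChar = [] := by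
    apply List.filter_eq_nil_iff.mpr
    intro c hc
    simp [pvLooseChar_of_isspace c (List.mem_takeWhile_imp hc)]
  simp [this]

-- stripping does not change the normalized text
lemma pvNormB_strip (cs : List Char) : pvNormB (PySem.Chars.strip cs) = pvNormB cs := by
  unfold pvNormB
  congr 1
  unfold PySem.Chars.strip PySem.Chars.lstrip PySem.Chars.rstrip
  rw [List.filter_reverse, pvFilter_dropWhile, List.filter_reverse, List.reverse_reverse,
      pvFilter_dropWhile]

lemma pvNormB_append (l r : List Char) : pvNormB (l ++ r) = pvNormB l ++ pvNormB r := by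
  simp [pvNormB, List.filter_append]

-- merging inserts at most a space, which normalization drops
lemma pvNormB_merge (l r : List Char) : pvNormB (pvMergeText l r) = pvNormB l ++ pvNormB r := by
  match l, r with
  | [], r => simp [pvMergeText, pvNormB]
  | a :: as_, [] => simp [pvMergeText, pvNormB]
  | a :: as_, r0 :: rs =>
    have h1 : pvNormB ((a :: as_) ++ (r0 :: rs)) = pvNormB (a :: as_) ++ pvNormB (r0 :: rs) :=
      pvNormB_append _ _
    have h2 : pvNormB ((a :: as_) ++ ' ' :: (r0 :: rs)) = pvNormB (a :: as_) ++ pvNormB (r0 :: rs) := by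
      have hsp : pvNormB (' ' :: (r0 :: rs)) = pvNormB (r0 :: rs) := by
        simp [pvNormB, List.filter_cons, show pvLooseChar ' ' = false from by decide]
      rw [pvNormB_append, hsp]
    simp only [pvMergeText]
    split_ifs <;> first | exact h1 | exact h2

-- the two loops agree whenever acc is the normalization of merged, acc ≠ np and |acc| ≤ |np|
lemma pvLoop_eq (l : List (List (String × String))) (np : List Char) (hnp : np ≠ [])
    (items : List (Int × List (String × String))) :
    ∀ merged acc, acc = pvNormB merged → acc ≠ np → acc.length ≤ np.length →
      pvDropLoopA l np items merged = pvDropLoopB l np items acc := by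
  induction items with
  | nil => intro merged acc _ _ _; rfl
  | cons hd rest ih =>
    obtain ⟨index, item⟩ := hd
    intro merged acc h1 h2 h3
    rw [pvDropLoopA, pvDropLoopB]
    cases hget : PySem.Dict.get? (⟨item⟩ : PySem.Dict String String) "text" with
    | none =>
      have hb : (acc == np) = false := by simpa using h2
      have hl : ¬ np.length < acc.length := by omega
      simp only [hb, Bool.false_eq_true, if_false, if_neg hl]
      exact ih merged acc h1 h2 h3
    | some text =>
      dsimp only
      by_cases hst : (PySem.Chars.strip text.toList).isEmpty
      · -- stripped empty ⇒ normalize text = [] ⇒ acc unchanged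
        have hnt : pvNormB text.toList = [] := by
          rw [← pvNormB_strip]
          simp only [List.isEmpty_iff] at hst
          simp [hst, pvNormB]
        have hb : (acc == np) = false := by simpa using h2
        have hl : ¬ np.length < acc.length := by omega
        rw [if_pos hst]
        simp only [hnt, List.append_nil, hb, Bool.false_eq_true, if_false, if_neg hl]
        exact ih merged acc h1 h2 h3
      · rw [if_neg hst]
        set merged' := if merged.isEmpty then PySem.Chars.strip text.toList
                       else pvMergeText merged (PySem.Chars.strip text.toList) with hm
        have hkey : pvNormB merged' = acc ++ pvNormB text.toList := by
          rw [hm]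
          by_cases hme : merged.isEmpty
          · have : merged = [] := by simpa [List.isEmpty_iff] using hme
            rw [if_pos hme, pvNormB_strip]
            simp [h1, this, pvNormB]
          · rw [if_neg hme, pvNormB_merge, pvNormB_strip, h1]
        simp only [pvNormalizeLoose_eq, hkey]
        by_cases hempty : (acc ++ pvNormB text.toList).isEmpty
        · have hne : acc ++ pvNormB text.toList ≠ np := by
            simp only [List.isEmpty_iff] at hempty
            rw [hempty]; exact fun h => hnp h.symm
          have hb : (acc ++ pvNormB text.toList == np) = false := by simpa using hne
          have hl : ¬ np.length < (acc ++ pvNormB text.toList).length := by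
            simp only [List.isEmpty_iff] at hempty; simp [hempty]
          rw [if_pos hempty]
          simp only [hb, Bool.false_eq_true, if_false, if_neg hl]
          exact ih merged' (acc ++ pvNormB text.toList) hkey.symm hne
            (by simp only [List.isEmpty_iff] at hempty; simp [hempty])
        · rw [if_neg hempty]
          by_cases heq : acc ++ pvNormB text.toList = np
          · have hb : (acc ++ pvNormB text.toList == np) = true := by simpa using heq
            simp only [hb, if_true]
          · have hb : (acc ++ pvNormB text.toList == np) = false := by simpa using heq
            simp only [hb, Bool.false_eq_true, if_false]
            by_cases hlen : np.length < (acc ++ pvNormB text.toList).length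
            · rw [if_pos hlen, if_pos hlen]
            · rw [if_neg hlen, if_neg hlen]
              exact ih merged' (acc ++ pvNormB text.toList) hkey.symm heq (by omega)

-- ===== VERDICT (by name: the statement is the Claim_ definition above) =====
theorem drop_word_timing_prefix_spec : Claim_equal_drop_word_timing_prefix := by
  intro wt p mi _
  unfold Spec_drop_word_timing_prefix
  cases wt with
  | none => rfl
  | some l =>
    simp only [drop_word_timing_prefix, drop_word_timing_prefix_alt]
    by_cases hl : l.isEmpty
    · simp [hl]
    · rw [if_neg hl, if_neg hl, pvNormalizeLoose_eq]
      by_cases hp : (pvNormB p.toList).isEmpty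
      · rw [if_pos hp, if_pos hp]
      · rw [if_neg hp, if_neg hp]
        have hnpe : pvNormB p.toList ≠ [] := by simpa [List.isEmpty_iff] using hp
        rw [pvLoop_eq l (pvNormB p.toList) hnpe _ [] [] rfl (fun h => hnpe h.symm) (by simp)]
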